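-- pv_equiv track=rewrite | github.com/emarcey/cryptopals | exercises/set_1.py | hex_to_text
-- ===== SOURCE A (Python) =====
-- def hex_to_text(s: str) -> str:
--     result = ""
--     curr = 0
--     for i in range(len(s)):
--         val = int(s[i], 16) * (16 ** ((i + 1) % 2))
--         curr += val
--         if i % 2 == 1:
--             result += chr(curr)
--             curr = 0
--     return result
-- ===== SOURCE B (Python) =====
-- def hex_to_text(s: str) -> str:
--     # Pass 1: decode every character to its nibble value (raises exactly where A does).
--     nibbles = [int(c, 16) for c in s]
--     # Pass 2: recursively combine consecutive nibble pairs, dropping a lone trailing nibble.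
--     def pack(ns):
--         if len(ns) < 2:
--             return ""
--         return chr(ns[0] * 16 + ns[1]) + pack(ns[2:])
--     return pack(nibbles)
-- ===== Notes on version B (the rewrite author's own statement) =====
-- stated objective: alternative
-- what changed: Replaced A's single index loop carrying a parity flag and a running accumulator by two passes: a comprehension decoding every character to a nibble value, then a recursive pairing of consecutive nibbles.
import Mathlib
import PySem

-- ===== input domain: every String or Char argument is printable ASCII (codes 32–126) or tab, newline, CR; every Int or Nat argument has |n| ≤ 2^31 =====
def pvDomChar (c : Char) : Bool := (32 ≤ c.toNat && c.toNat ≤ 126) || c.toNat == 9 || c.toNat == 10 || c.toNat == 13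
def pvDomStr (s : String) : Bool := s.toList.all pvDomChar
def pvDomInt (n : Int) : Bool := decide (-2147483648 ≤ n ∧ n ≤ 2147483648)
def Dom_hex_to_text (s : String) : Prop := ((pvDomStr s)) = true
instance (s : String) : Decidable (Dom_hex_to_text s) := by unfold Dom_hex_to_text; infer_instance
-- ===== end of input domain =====

-- B differs from A by decomposition: one nibble-decoding pass, then a recursive pairing pass.

-- int(c, 16) for a single character; Python raises ValueError on a non-hex-digit
-- character (excluded by Pre_hex_to_text), so the final branch's value is never relied on.
def pvHexVal (c : Char) : Int :=
  if '0' ≤ c ∧ c ≤ '9' then (c.toNat : Int) - 48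
  else if 'a' ≤ c ∧ c ≤ 'f' then (c.toNat : Int) - 87
  else if 'A' ≤ c ∧ c ≤ 'F' then (c.toNat : Int) - 55
  else 0

-- ===== PORT A =====
-- the loop body: state = (result as a char list, curr); result += chr(curr) appends one char
def pvStepA (cs : List Char) (acc : List Char × Int) (i : Nat) : List Char × Int :=
  let val := pvHexVal (cs.getD i ' ') * 16 ^ ((i + 1) % 2)
  let curr := acc.2 + val
  if i % 2 == 1 then (acc.1 ++ [Char.ofNat curr.toNat], 0) else (acc.1, curr)

def hex_to_text (s : String) : String :=
  let cs := s.toList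
  String.mk ((List.range cs.length).foldl (pvStepA cs) ([], 0)).1

-- ===== PORT B =====
-- pack(ns): combine consecutive nibble pairs recursively, dropping a lone trailing nibble
def pvPack (ns : List Int) : List Char :=
  match ns with
  | a :: b :: t => Char.ofNat (a * 16 + b).toNat :: pvPack t
  | _ => []

def hex_to_text_alt (s : String) : String :=
  String.mk (pvPack (s.toList.map pvHexVal))

-- ===== PRECONDITION & SPEC =====
-- Pre_ excludes exactly the strings containing a non-hex-digit character, on which the
-- Python A (and B) raises ValueError and returns nothing.
def Pre_hex_to_text (s : String) : Prop :=
  s.toList.all (fun c => ('0' ≤ c ∧ c ≤ '9') ∨ ('a' ≤ c ∧ c ≤ 'f') ∨ ('A' ≤ c ∧ c ≤ 'F')) = true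
instance (s : String) : Decidable (Pre_hex_to_text s) := by unfold Pre_hex_to_text; infer_instance
def pvWitness_hex_to_text : String := "48656c6C6f"

def Spec_hex_to_text (s : String) (out : String) : Prop := out = hex_to_text_alt s
instance (s : String) (out : String) : Decidable (Spec_hex_to_text s out) := by unfold Spec_hex_to_text; infer_instance

-- ===== CLAIM (what is proved, stated in full; the proofs are below) =====
def Claim_equal_hex_to_text : Prop := ∀ (s : String), Dom_hex_to_text s → Pre_hex_to_text s → Spec_hex_to_text s (hex_to_text s)

-- ===== LEMMAS AND PROOFS =====

-- induction principle for two-at-a-time recursion on a char list (proof helper only)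
def pvPairsInd (cs : List Char) : Unit :=
  match cs with
  | _ :: _ :: t => pvPairsInd t
  | _ => ()

-- loop invariant for A: starting at an even index with curr = 0, the loop appends pvPack
lemma pvLoopA : ∀ (suf pre r : List Char), pre.length % 2 = 0 →
    ((List.range' pre.length suf.length).foldl (pvStepA (pre ++ suf)) (r, 0)).1
      = r ++ pvPack (suf.map pvHexVal) := by
  intro suf
  induction suf using pvPairsInd.induct with
  | case1 a b t ih =>
    intro pre r hpre
    have h1 : (pre.length + 1) % 2 = 1 := by omega
    have h2 : (pre.length + 2) % 2 = 0 := by omega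
    have hlen : (a :: b :: t).length = t.length + 2 := by simp
    rw [hlen, List.range'_succ, List.foldl_cons, List.range'_succ, List.foldl_cons]
    have e1 : pvStepA (pre ++ a :: b :: t) (r, 0) pre.length
        = (r, pvHexVal a * 16) := by
      simp [pvStepA, hpre, h1]
    have e2 : pvStepA (pre ++ a :: b :: t) (r, pvHexVal a * 16) (pre.length + 1)
        = (r ++ [Char.ofNat (pvHexVal a * 16 + pvHexVal b).toNat], 0) := by
      simp [pvStepA, h1, h2]
    rw [e1, e2]
    have hassoc : pre ++ a :: b :: t = (pre ++ [a, b]) ++ t := by simp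
    have hlen2 : pre.length + 1 + 1 = (pre ++ [a, b]).length := by simp
    rw [hassoc, hlen2, ih (pre ++ [a, b]) _ (by simp only [List.length_append, List.length_cons, List.length_nil]; omega)]
    simp [pvPack]
  | case2 ns hns =>
    intro pre r hpre
    match ns, hns with
    | [], _ => simp [pvPack]
    | [a], _ =>
      simp [List.range'_succ, pvStepA, Nat.mod_two_ne_one.mpr hpre, pvPack]
    | a :: b :: t, h => exact ((h a b t rfl).elim)

-- ===== VERDICT (by name: the statement is the Claim_ definition above) =====
theorem hex_to_text_spec : Claim_equal_hex_to_text := by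
  intro s _ _
  unfold Spec_hex_to_text
  have h := pvLoopA s.toList [] [] (by simp)
  simp only [List.nil_append, List.length_nil] at h
  simp only [hex_to_text, hex_to_text_alt, List.range_eq_range']
  rw [h]
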